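-- pv_equiv track=rewrite | github.com/dinghaoluo/code_mpfi_dinghao | imaging_code/extract_axon_GCaMP.py | filter_valid_rois
-- ===== SOURCE A (Python) =====
-- def filter_valid_rois(stat):
--     """
--     filter ROIs to include only those with the longest or unique 'imerge' lists
--
--     fix the issue where serial merges on the same constituent ROIs may cause
--     multiple new ROIs (e.g. ROI 817 may have an imerge-list that is a subset of
--     that of ROI 818, in which case we want to eliminate ROI 817),
--     13 Nov 2024 Dinghao
--
--     parameters
--     ----------
--     stat : list
--         list of ROI dictionaries, each containing an 'imerge' key with constituent ROIs
--
--     returns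
--     -------
--     valid_rois : list
--         list of indices of ROIs with the longest or unique 'imerge' lists
--     tot_valids : int
--         total count of valid ROIs
--     """
--     valid_rois = []
--
--     # create a sorted list of ROI indices based on the length of their 'imerge' lists, from longest to shortest
--     sorted_rois = sorted(range(len(stat)), key=lambda roi: len(stat[roi]['imerge']), reverse=True)
--
--     # initialise a set to keep track of constituent ROIs that are part of any valid ROI's merge list
--     covered_constituents = set()
--
--     # loop through the sorted indices
--     for roi in sorted_rois:
--         imerge_set = set(stat[roi]['imerge'])  # convert the imerge list to a set for easy subset checking
--
--         # check if this ROI's constituent ROIs are already covered by any previously added valid ROIs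
--         if not imerge_set.issubset(covered_constituents):
--             # add this ROI index to the valid_rois list
--             valid_rois.append(roi)
--
--             # update the set to include this ROI's constituents
--             covered_constituents.update(imerge_set)
--
--     # return valid ROIs and the total count of valid ROIs
--     return valid_rois
-- ===== SOURCE B (Python) =====
-- def filter_valid_rois(stat):
--     # same sorted order as the original, longest imerge first (stable)
--     sorted_rois = sorted(range(len(stat)), key=lambda roi: len(stat[roi]['imerge']), reverse=True)
--
--     # pass 1: assign each constituent to the first ROI (in sorted order) containing it
--     owner = {}
--     for roi in sorted_rois:
--         for c in stat[roi]['imerge']: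
--             if c not in owner:
--                 owner[c] = roi
--
--     # pass 2: a ROI is valid iff it owns at least one constituent
--     owners = set(owner.values())
--     valid_rois = []
--     for roi in sorted_rois:
--         if roi in owners:
--             valid_rois.append(roi)
--     return valid_rois
-- ===== Notes on version B (the rewrite author's own statement) =====
-- stated objective: alternative
-- what changed: Replaces the greedy covered-set/subset-test loop by two passes: a first-owner dict mapping each constituent to the earliest ROI (in the same sorted order) containing it, then selecting exactly the ROIs that own some constituent; Pre_ excludes ROI entries missing the 'imerge' key (KeyError) and association lists with duplicate keys, which no Python dict can represent.
import Mathlib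
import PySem

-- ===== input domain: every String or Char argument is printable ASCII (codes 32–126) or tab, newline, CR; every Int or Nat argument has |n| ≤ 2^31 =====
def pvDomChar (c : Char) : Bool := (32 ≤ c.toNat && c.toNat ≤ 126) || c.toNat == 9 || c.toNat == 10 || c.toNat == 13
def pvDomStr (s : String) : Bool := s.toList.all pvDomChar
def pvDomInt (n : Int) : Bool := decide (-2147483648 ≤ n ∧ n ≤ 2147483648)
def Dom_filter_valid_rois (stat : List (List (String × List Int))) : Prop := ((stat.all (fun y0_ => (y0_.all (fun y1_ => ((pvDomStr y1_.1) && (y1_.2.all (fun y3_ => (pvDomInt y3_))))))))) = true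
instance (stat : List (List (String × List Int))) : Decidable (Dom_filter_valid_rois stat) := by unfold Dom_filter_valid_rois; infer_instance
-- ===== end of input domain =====

-- B replaces A's greedy covered-set/subset loop by a first-owner dict pass plus a selection pass
-- (objective: alternative decomposition, same asymptotic cost).

-- ===== PORT A =====
-- stat[roi]['imerge']  (both Pythons contain this identical expression)
def imergeOf (stat : List (List (String × List Int))) (roi : Int) : List Int :=
  ((PySem.Dict.mk (PySem.List.pyGetD stat roi [])).get? "imerge").getD []

-- sorted(range(len(stat)), key=lambda roi: len(stat[roi]['imerge']), reverse=True)
-- (identical line in both Pythons)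
def sortedRois (stat : List (List (String × List Int))) : List Int :=
  PySem.List.sorted (PySem.List.pyRange 0 (stat.length : Int))
    (fun roi => (imergeOf stat roi).length) true

def filter_valid_rois (stat : List (List (String × List Int))) : List Int :=
  ((sortedRois stat).foldl
    (fun (st : List Int × PySem.Set Int) roi =>
      let imerge_set : PySem.Set Int := PySem.Set.ofList (imergeOf stat roi)
      if !(PySem.Set.issubset imerge_set st.2) then
        (st.1 ++ [roi], PySem.Set.update st.2 imerge_set)
      else st)
    ([], PySem.Set.empty)).1

-- ===== PORT B =====
-- inner loop of pass 1: for c in stat[roi]['imerge']: if c not in owner: owner[c] = roi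
def ownerStep (stat : List (List (String × List Int))) (d : PySem.Dict Int Int) (roi : Int) :
    PySem.Dict Int Int :=
  (imergeOf stat roi).foldl
    (fun d c => if !(d.contains c) then d.insert c roi else d) d

def filter_valid_rois_alt (stat : List (List (String × List Int))) : List Int :=
  let sorted_rois := sortedRois stat
  let owner := sorted_rois.foldl (ownerStep stat) PySem.Dict.empty
  let owners : PySem.Set Int := PySem.Set.ofList owner.values
  sorted_rois.foldl (fun acc roi => if PySem.Set.contains owners roi then acc ++ [roi] else acc) []

-- ===== PRECONDITION & SPEC =====
-- Pre_ excludes ROI entries missing the 'imerge' key (Python A raises KeyError there) and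
-- association lists with duplicate keys, which no Python dict input can represent (the
-- first-vs-last-match behaviour there is accidental).
def Pre_filter_valid_rois (stat : List (List (String × List Int))) : Prop :=
  ∀ d ∈ stat, ("imerge" ∈ d.map Prod.fst) ∧ (d.map Prod.fst).Nodup
instance (stat : List (List (String × List Int))) : Decidable (Pre_filter_valid_rois stat) := by
  unfold Pre_filter_valid_rois; infer_instance
def pvWitness_filter_valid_rois : (List (List (String × List Int))) := [[("imerge", [0, 1])]]

def Spec_filter_valid_rois (stat : List (List (String × List Int))) (out : List Int) : Prop :=
  out = filter_valid_rois_alt stat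
instance (stat : List (List (String × List Int))) (out : List Int) :
    Decidable (Spec_filter_valid_rois stat out) := by unfold Spec_filter_valid_rois; infer_instance

-- ===== CLAIM (what is proved, stated in full; the proofs are below) =====
def Claim_equal_filter_valid_rois : Prop := ∀ (stat : List (List (String × List Int))), Dom_filter_valid_rois stat → Pre_filter_valid_rois stat → Spec_filter_valid_rois stat (filter_valid_rois stat)

-- ===== LEMMAS AND PROOFS =====

-- reference selection: keep r iff it has a constituent not seen in any earlier list
def refSel (g : Int → List Int) (seen : List Int) : List Int → List Int
  | [] => []
  | r :: rest =>
      if (g r).all (fun c => seen.contains c) then refSel g (seen ++ g r) rest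
      else r :: refSel g (seen ++ g r) rest

-- ---- A side ----
theorem A_loop (g : Int → List Int) (L : List Int) :
    ∀ (cov : PySem.Set Int) (acc seen : List Int), (∀ c : Int, c ∈ cov ↔ c ∈ seen) →
    (L.foldl
      (fun (st : List Int × PySem.Set Int) roi =>
        if !(PySem.Set.issubset (PySem.Set.ofList (g roi)) st.2) then
          (st.1 ++ [roi], PySem.Set.update st.2 (PySem.Set.ofList (g roi)))
        else st)
      (acc, cov)).1 = acc ++ refSel g seen L := by
  induction L with
  | nil => intro cov acc seen _; simp [refSel]
  | cons r rest ih =>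
    intro cov acc seen h
    have hcond : PySem.Set.issubset (PySem.Set.ofList (g r)) cov
        = (g r).all (fun c => seen.contains c) := by
      rw [Bool.eq_iff_iff, PySem.Set.issubset_iff, List.all_eq_true]
      constructor
      · intro hs c hc
        have := hs c ((PySem.Set.mem_ofList _ _).mpr hc)
        simpa [List.contains_iff_mem] using (h c).mp this
      · intro hs x hx
        have hx' := (PySem.Set.mem_ofList _ _).mp hx
        have := hs x hx'
        exact (h x).mpr (by simpa [List.contains_iff_mem] using this)
    simp only [List.foldl_cons, refSel, hcond]
    by_cases hall : (g r).all (fun c => seen.contains c) = true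
    · rw [hall]
      simp only [Bool.not_true, Bool.false_eq_true, if_false, if_true]
      apply ih
      intro c
      rw [h c, List.mem_append]
      constructor
      · exact Or.inl
      · rintro (hc | hc)
        · exact hc
        · have := List.all_eq_true.mp hall c hc
          simpa [List.contains_iff_mem] using this
    · have h2 : (g r).all (fun c => seen.contains c) = false := by
        simpa using hall
      rw [h2]
      simp only [Bool.not_false, if_true, Bool.false_eq_true, if_false]
      have := ih (PySem.Set.update cov (PySem.Set.ofList (g r))) (acc ++ [r]) (seen ++ g r)
        (by intro c
            rw [PySem.Set.mem_update, List.mem_append, PySem.Set.mem_ofList, h c])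
      rw [this]; simp

-- ---- B side: the constituent-owner dict ----

-- one ROI's inner loop
theorem own1_contains (roi : Int) (cs : List Int) :
    ∀ (d : PySem.Dict Int Int) (c : Int),
    (cs.foldl (fun d c => if !(d.contains c) then d.insert c roi else d) d).contains c = true
      ↔ d.contains c = true ∨ c ∈ cs := by
  induction cs with
  | nil => intro d c; simp
  | cons a rest ih =>
    intro d c
    simp only [List.foldl_cons]
    by_cases ha : d.contains a = true
    · rw [if_neg (by simp [ha]), ih]
      constructor
      · rintro (hc | hc)
        · exact Or.inl hc
        · exact Or.inr (List.mem_cons_of_mem _ hc)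
      · rintro (hc | hc)
        · exact Or.inl hc
        · rcases List.mem_cons.mp hc with rfl | hc2
          · exact Or.inl ha
          · exact Or.inr hc2
    · have ha' : d.contains a = false := by simpa using ha
      rw [if_pos (by simp [ha']), ih]
      simp only [PySem.Dict.contains_iff_mem_keys, PySem.Dict.mem_keys_insert, List.mem_cons]
      tauto

theorem own1_values_mono (roi : Int) (cs : List Int) :
    ∀ (d : PySem.Dict Int Int) (v : Int), v ∈ d.values →
    v ∈ (cs.foldl (fun d c => if !(d.contains c) then d.insert c roi else d) d).values := by
  induction cs with
  | nil => intro d v hv; simpa using hv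
  | cons a rest ih =>
    intro d v hv
    simp only [List.foldl_cons]
    by_cases ha : d.contains a = true
    · rw [if_neg (by simp [ha])]; exact ih d v hv
    · have ha' : d.contains a = false := by simpa using ha
      rw [if_pos (by simp [ha'])]
      apply ih
      simp only [PySem.Dict.values, PySem.Dict.items_insert_of_not_contains d roi ha',
        List.map_append, List.mem_append]
      exact Or.inl (by simpa [PySem.Dict.values] using hv)

theorem own1_values_sub (roi : Int) (cs : List Int) :
    ∀ (d : PySem.Dict Int Int) (v : Int),
    v ∈ (cs.foldl (fun d c => if !(d.contains c) then d.insert c roi else d) d).values →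
    v ∈ d.values ∨ v = roi := by
  induction cs with
  | nil => intro d v hv; exact Or.inl (by simpa using hv)
  | cons a rest ih =>
    intro d v hv
    simp only [List.foldl_cons] at hv
    by_cases ha : d.contains a = true
    · rw [if_neg (by simp [ha])] at hv; exact ih d v hv
    · have ha' : d.contains a = false := by simpa using ha
      rw [if_pos (by simp [ha'])] at hv
      rcases ih _ v hv with hv' | hv'
      · simp only [PySem.Dict.values, PySem.Dict.items_insert_of_not_contains d roi ha',
          List.map_append, List.mem_append] at hv'
        rcases hv' with hv' | hv'
        · exact Or.inl (by simpa [PySem.Dict.values] using hv')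
        · simp at hv'; exact Or.inr hv'
      · exact Or.inr hv'

theorem own1_id_of_all (roi : Int) (cs : List Int) :
    ∀ (d : PySem.Dict Int Int), (∀ c ∈ cs, d.contains c = true) →
    cs.foldl (fun d c => if !(d.contains c) then d.insert c roi else d) d = d := by
  induction cs with
  | nil => intro d _; rfl
  | cons a rest ih =>
    intro d h
    simp only [List.foldl_cons]
    rw [if_neg (by simp [h a (List.mem_cons_self ..)])]
    exact ih d (fun c hc => h c (List.mem_cons_of_mem _ hc))

theorem own1_mem_values_of_fresh (roi : Int) (cs : List Int) :
    ∀ (d : PySem.Dict Int Int), (∃ c ∈ cs, d.contains c = false) →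
    roi ∈ (cs.foldl (fun d c => if !(d.contains c) then d.insert c roi else d) d).values := by
  induction cs with
  | nil => rintro d ⟨c, hc, _⟩; simp at hc
  | cons a rest ih =>
    rintro d ⟨c, hc, hcf⟩
    simp only [List.foldl_cons]
    by_cases ha : d.contains a = true
    · rw [if_neg (by simp [ha])]
      apply ih
      rcases List.mem_cons.mp hc with rfl | hc'
      · rw [ha] at hcf; simp at hcf
      · exact ⟨c, hc', hcf⟩
    · have ha' : d.contains a = false := by simpa using ha
      rw [if_pos (by simp [ha'])]
      apply own1_values_mono
      simp [PySem.Dict.values, PySem.Dict.items_insert_of_not_contains d roi ha']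

-- lifted to the fold over the whole ROI list
theorem ownFold_values_sub (stat : List (List (String × List Int))) (L : List Int) :
    ∀ (d : PySem.Dict Int Int) (v : Int),
    v ∈ (L.foldl (ownerStep stat) d).values → v ∈ d.values ∨ v ∈ L := by
  induction L with
  | nil => intro d v hv; exact Or.inl (by simpa using hv)
  | cons r rest ih =>
    intro d v hv
    simp only [List.foldl_cons] at hv
    rcases ih _ v hv with hv' | hv'
    · rcases own1_values_sub r (imergeOf stat r) d v hv' with h' | h'
      · exact Or.inl h'
      · exact Or.inr (h' ▸ List.mem_cons_self ..)
    · exact Or.inr (List.mem_cons_of_mem _ hv')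

theorem ownFold_values_mono (stat : List (List (String × List Int))) (L : List Int) :
    ∀ (d : PySem.Dict Int Int) (v : Int),
    v ∈ d.values → v ∈ (L.foldl (ownerStep stat) d).values := by
  induction L with
  | nil => intro d v hv; simpa using hv
  | cons r rest ih =>
    intro d v hv
    simp only [List.foldl_cons]
    exact ih _ v (own1_values_mono r (imergeOf stat r) d v hv)

-- the selection pass of B equals refSel
theorem B_char (stat : List (List (String × List Int))) (L : List Int) :
    ∀ (d : PySem.Dict Int Int) (seen : List Int),
    (∀ c : Int, d.contains c = true ↔ c ∈ seen) → (∀ r ∈ L, r ∉ d.values) → L.Nodup →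
    L.filter (fun r => (L.foldl (ownerStep stat) d).values.contains r)
      = refSel (imergeOf stat) seen L := by
  induction L with
  | nil => intro d seen _ _ _; simp [refSel]
  | cons r rest ih =>
    intro d seen hseen hval hnd
    have hndr := (List.nodup_cons.mp hnd).2
    have hrrest : r ∉ rest := (List.nodup_cons.mp hnd).1
    simp only [List.foldl_cons, List.filter_cons]
    have hmem : r ∈ ((r :: rest).foldl (ownerStep stat) d).values
        ↔ ¬ ((imergeOf stat r).all (fun c => seen.contains c) = true) := by
      simp only [List.foldl_cons]
      constructor
      · intro hin hall
        have hall' : ∀ c ∈ imergeOf stat r, d.contains c = true := by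
          intro c hc
          have := List.all_eq_true.mp hall c hc
          exact (hseen c).mpr (by simpa [List.contains_iff_mem] using this)
        rcases ownFold_values_sub stat rest _ r hin with h' | h'
        · rw [show ownerStep stat d r = d from own1_id_of_all r _ d hall'] at h'
          exact hval r (List.mem_cons_self ..) h'
        · exact hrrest h'
      · intro hall
        apply ownFold_values_mono
        apply own1_mem_values_of_fresh
        by_contra hno
        apply hall
        rw [List.all_eq_true]
        intro c hc
        have : d.contains c = true := by
          by_contra hcf
          exact hno ⟨c, hc, by simpa using hcf⟩
        simpa [List.contains_iff_mem] using (hseen c).mp this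
    have hseen' : ∀ c : Int, (ownerStep stat d r).contains c = true ↔ c ∈ seen ++ imergeOf stat r := by
      intro c
      rw [List.mem_append, ← hseen c]
      exact own1_contains r (imergeOf stat r) d c
    have hval' : ∀ r' ∈ rest, r' ∉ (ownerStep stat d r).values := by
      intro r' hr' hin
      rcases own1_values_sub r (imergeOf stat r) d r' hin with h' | h'
      · exact hval r' (List.mem_cons_of_mem _ hr') h'
      · exact hrrest (h' ▸ hr')
    have := ih (ownerStep stat d r) (seen ++ imergeOf stat r) hseen' hval' hndr
    by_cases hall : (imergeOf stat r).all (fun c => seen.contains c) = true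
    · have hnot : ((rest.foldl (ownerStep stat) (ownerStep stat d r)).values.contains r) = false := by
        rw [Bool.eq_false_iff]
        intro hb
        exact (hmem.mp (by simpa [List.foldl_cons, List.contains_iff_mem] using hb)) hall
      rw [hnot]
      simp only [refSel, if_pos hall]
      exact this
    · have hyes : ((rest.foldl (ownerStep stat) (ownerStep stat d r)).values.contains r) = true := by
        rw [List.contains_iff_mem]
        exact hmem.mpr hall
      rw [hyes]
      simp only [refSel, if_neg hall]
      rw [this]
      simp

theorem sortedRois_nodup (stat : List (List (String × List Int))) : (sortedRois stat).Nodup := by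
  have hperm := PySem.List.sorted_perm (PySem.List.pyRange 0 (stat.length : Int))
    (fun roi => (imergeOf stat roi).length) true
  apply hperm.nodup_iff.mpr
  rw [PySem.List.pyRange_zero_natCast]
  exact (List.nodup_range).map (fun x y h => by exact_mod_cast h)

theorem filter_valid_rois_eq (stat : List (List (String × List Int))) :
    filter_valid_rois stat = filter_valid_rois_alt stat := by
  have hA : filter_valid_rois stat = refSel (imergeOf stat) [] (sortedRois stat) := by
    unfold filter_valid_rois
    have := A_loop (imergeOf stat) (sortedRois stat) PySem.Set.empty [] []
      (by intro c; simp [PySem.Set.empty])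
    simpa using this
  have hB : filter_valid_rois_alt stat = refSel (imergeOf stat) [] (sortedRois stat) := by
    unfold filter_valid_rois_alt
    simp only [PySem.List.foldl_append_if_eq_filter, List.nil_append]
    rw [← B_char stat (sortedRois stat) PySem.Dict.empty []
      (by intro c; simp) (by intro r _ h; simp [PySem.Dict.values, PySem.Dict.empty] at h)
      (sortedRois_nodup stat)]
    apply List.filter_congr
    intro x _
    rw [PySem.Set.contains_eq_listContains, Bool.eq_iff_iff, List.contains_iff_mem,
      List.contains_iff_mem]
    exact PySem.Set.mem_ofList _ x
  rw [hA, hB]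

-- ===== VERDICT (by name: the statement is the Claim_ definition above) =====
theorem filter_valid_rois_spec : Claim_equal_filter_valid_rois := by
  intro stat _ _
  unfold Spec_filter_valid_rois
  exact filter_valid_rois_eq stat
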